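-- pv_equiv track=rewrite | github.com/Dasperless/Proyectos-TEC | Taller de programación/Laboratorios/Lab4.py | lista_menores
-- ===== SOURCE A (Python) =====
-- def lista_menores(lista,piv):
--     if lista == []:
--         return []
--     else:
--         if lista[0]<piv:
--             return [lista[0]]+lista_menores(lista[1:],piv)
--         else:
--             return lista_menores(lista[1:],piv)
-- ===== SOURCE B (Python) =====
-- def lista_menores(lista, piv):
--     res = []
--     for x in lista:
--         if x < piv:
--             res.append(x)
--     return res
-- ===== Notes on version B (the rewrite author's own statement) =====
-- stated objective: faster
-- what changed: Replaces head/tail recursion that rebuilds lists via slicing and concatenation with a single iterative for-loop appending into an accumulator.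
import Mathlib
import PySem

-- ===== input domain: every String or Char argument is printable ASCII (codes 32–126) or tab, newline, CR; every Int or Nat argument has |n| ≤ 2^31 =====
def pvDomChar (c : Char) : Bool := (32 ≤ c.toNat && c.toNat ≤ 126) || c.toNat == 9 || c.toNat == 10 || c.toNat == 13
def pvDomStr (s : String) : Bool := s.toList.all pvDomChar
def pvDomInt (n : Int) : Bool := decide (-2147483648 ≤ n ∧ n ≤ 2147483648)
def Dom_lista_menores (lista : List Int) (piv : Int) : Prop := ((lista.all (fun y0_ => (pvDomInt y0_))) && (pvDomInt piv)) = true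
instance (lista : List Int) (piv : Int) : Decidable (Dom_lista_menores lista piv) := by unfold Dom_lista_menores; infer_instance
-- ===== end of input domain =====

-- ===== PORT A =====
def lista_menores (lista : List Int) (piv : Int) : List Int :=
  match lista with
  | [] => []
  | x :: rest =>
      if x < piv then [x] ++ lista_menores rest piv
      else lista_menores rest piv

-- ===== PORT B =====
-- iterative accumulator: res = []; for x in lista: if x < piv: res.append(x)
def lista_menores_alt (lista : List Int) (piv : Int) : List Int :=
  lista.foldl (fun res x => if x < piv then res ++ [x] else res) []

-- ===== PRECONDITION & SPEC =====
def Spec_lista_menores (lista : List Int) (piv : Int) (out : List Int) : Prop := out = lista_menores_alt lista piv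
instance (lista : List Int) (piv : Int) (out : List Int) : Decidable (Spec_lista_menores lista piv out) := by unfold Spec_lista_menores; infer_instance

-- ===== CLAIM (what is proved, stated in full; the proofs are below) =====
def Claim_equal_lista_menores : Prop := ∀ (lista : List Int) (piv : Int), Dom_lista_menores lista piv → Spec_lista_menores lista piv (lista_menores lista piv)

-- ===== LEMMAS AND PROOFS =====
theorem foldl_acc (lista : List Int) (piv : Int) (acc : List Int) :
    lista.foldl (fun res x => if x < piv then res ++ [x] else res) acc
      = acc ++ lista_menores lista piv := by
  induction lista generalizing acc with
  | nil => simp [lista_menores]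
  | cons x rest ih =>
      simp only [List.foldl, lista_menores]
      split <;> simp [ih]

-- ===== VERDICT (by name: the statement is the Claim_ definition above) =====
theorem lista_menores_spec : Claim_equal_lista_menores := by
  intro lista piv _
  unfold Spec_lista_menores lista_menores_alt
  simpa using (foldl_acc lista piv []).symm
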